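-- pv_equiv track=rewrite | github.com/pypi-data/pypi-mirror-171 | packages/picchick/picchick-0.3.1.tar.gz/picchick-0.3.1/picchick/hexfile.py | chunkWords
-- ===== SOURCE A (Python) =====
-- def chunkWords(words, chunksize=64, padding=0x3FFF):
--     rows = {}
--
--     for word_address in sorted(words):
--         row_start_address = word_address - (word_address % chunksize)
--         row_address_offset = word_address - row_start_address
--
--         if row_start_address not in rows:
--             if padding is not None:
--                 rows[row_start_address] = [padding for _ in range(chunksize)]
--             else:
--                 rows[row_start_address] = []
--
--         rows[row_start_address][row_address_offset] = words[word_address]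
--
--     return rows
-- ===== SOURCE B (Python) =====
-- def chunkWords(words, chunksize=64, padding=0x3FFF):
--     # Pass 1: bucket the sorted addresses by their row start address.
--     groups = {}
--     for a in sorted(words):
--         groups.setdefault(a - a % chunksize, []).append(a)
--     # Pass 2: build each row whole, then install it under its start address.
--     rows = {}
--     for start, addrs in groups.items():
--         row = [padding] * chunksize if padding is not None else []
--         for a in addrs:
--             row[a % chunksize] = words[a]
--         rows[start] = row
--     return rows
-- ===== Notes on version B (the rewrite author's own statement) =====
-- stated objective: alternative
-- what changed: A lazily creates rows and fills them one word at a time inside a single interleaved loop over the sorted addresses; B first buckets the sorted addresses by row start into a dict of address lists, then builds each padded row whole per bucket and installs it, preserving the increasing row-start insertion order.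
import Mathlib
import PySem

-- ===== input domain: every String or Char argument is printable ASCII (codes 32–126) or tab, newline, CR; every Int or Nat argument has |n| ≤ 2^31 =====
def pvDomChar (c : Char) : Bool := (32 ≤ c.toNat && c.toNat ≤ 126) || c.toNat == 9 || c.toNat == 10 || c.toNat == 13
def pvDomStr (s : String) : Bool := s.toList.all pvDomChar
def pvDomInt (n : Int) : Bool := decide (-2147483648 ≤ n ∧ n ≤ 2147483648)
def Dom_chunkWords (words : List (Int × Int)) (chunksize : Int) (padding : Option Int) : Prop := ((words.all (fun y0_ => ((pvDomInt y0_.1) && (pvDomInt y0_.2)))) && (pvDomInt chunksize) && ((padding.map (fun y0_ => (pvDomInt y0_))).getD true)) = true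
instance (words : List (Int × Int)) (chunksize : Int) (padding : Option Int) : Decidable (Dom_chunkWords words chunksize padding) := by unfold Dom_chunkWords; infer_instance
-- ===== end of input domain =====

-- B buckets the sorted addresses by row start first, then builds each padded row whole per bucket
-- (same cost as A, a different decomposition); equivalence of the returned dict is proved on Pre_.


-- ===== PORT A =====
def chunkWords (words : List (Int × Int)) (chunksize : Int) (padding : Option Int) : List (Int × List Int) :=
  let rows : PySem.Dict Int (List Int) :=
    (PySem.List.sorted (PySem.Set.ofList (words.map Prod.fst)) (fun a => a) false).foldl
      (fun rows a =>
        let rs := a - PySem.Int.mod a chunksize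
        let off := a - rs
        let rows := if rows.contains rs then rows
          else rows.insert rs (match padding with
            | some p => (PySem.List.pyRange 0 chunksize 1).map (fun _ => p)
            | none => [])
        rows.insert rs
          (PySem.List.pySetD (rows.getD rs []) off ((PySem.Dict.mk words).getD a 0)))
      PySem.Dict.empty
  rows.items

-- ===== PORT B =====
def chunkWords_alt (words : List (Int × Int)) (chunksize : Int) (padding : Option Int) : List (Int × List Int) :=
  let groups : PySem.Dict Int (List Int) :=
    (PySem.List.sorted (PySem.Set.ofList (words.map Prod.fst)) (fun a => a) false).foldl
      (fun g a => g.modify (a - PySem.Int.mod a chunksize) [] (· ++ [a])) PySem.Dict.empty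
  let rows : PySem.Dict Int (List Int) :=
    groups.items.foldl (fun rows p =>
        let row : List Int := match padding with
          | some pd => List.replicate chunksize.toNat pd
          | none => []
        let row := p.2.foldl
          (fun row a => PySem.List.pySetD row (PySem.Int.mod a chunksize) ((PySem.Dict.mk words).getD a 0)) row
        rows.insert p.1 row)
      PySem.Dict.empty
  rows.items

-- ===== PRECONDITION & SPEC =====
-- Pre_ marks exactly the inputs on which the Python A returns: with a nonempty words dict,
-- chunksize ≤ 0 raises (ZeroDivisionError at '%' for 0, IndexError for negative), and
-- padding=None raises IndexError (assignment into the empty row); an empty dict always returns {}.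
def Pre_chunkWords (words : List (Int × Int)) (chunksize : Int) (padding : Option Int) : Prop :=
  words = [] ∨ (0 < chunksize ∧ padding ≠ none)
instance (words : List (Int × Int)) (chunksize : Int) (padding : Option Int) : Decidable (Pre_chunkWords words chunksize padding) := by unfold Pre_chunkWords; infer_instance

def pvWitness_chunkWords : (List (Int × Int)) × Int × Option Int := ([(0, 7), (65, 9), (3, 1)], 64, some 16383)

def Spec_chunkWords (words : List (Int × Int)) (chunksize : Int) (padding : Option Int) (out : List (Int × List Int)) : Prop := out = chunkWords_alt words chunksize padding
instance (words : List (Int × Int)) (chunksize : Int) (padding : Option Int) (out : List (Int × List Int)) : Decidable (Spec_chunkWords words chunksize padding out) := by unfold Spec_chunkWords; infer_instance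

-- ===== CLAIM (what is proved, stated in full; the proofs are below) =====
def Claim_equal_chunkWords : Prop := ∀ (words : List (Int × Int)) (chunksize : Int) (padding : Option Int), Dom_chunkWords words chunksize padding → Pre_chunkWords words chunksize padding → Spec_chunkWords words chunksize padding (chunkWords words chunksize padding)

-- ===== LEMMAS AND PROOFS =====

-- A's loop body, with the row created for a fresh start address abstracted as `base`.
def pvStepA (words : List (Int × Int)) (c : Int) (base : List Int)
    (rows : PySem.Dict Int (List Int)) (a : Int) : PySem.Dict Int (List Int) :=
  let rs := a - PySem.Int.mod a c
  let off := a - rs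
  let rows := if rows.contains rs then rows else rows.insert rs base
  rows.insert rs (PySem.List.pySetD (rows.getD rs []) off ((PySem.Dict.mk words).getD a 0))

-- B's grouping step.
def pvStepB (c : Int) (g : PySem.Dict Int (List Int)) (a : Int) : PySem.Dict Int (List Int) :=
  g.modify (a - PySem.Int.mod a c) [] (· ++ [a])

def pvAsg (words : List (Int × Int)) (c : Int) (row : List Int) (a : Int) : List Int :=
  PySem.List.pySetD row (PySem.Int.mod a c) ((PySem.Dict.mk words).getD a 0)

def pvRow (words : List (Int × Int)) (c : Int) (base : List Int) (addrs : List Int) : List Int :=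
  addrs.foldl (pvAsg words c) base

-- Materialise a grouping dict into A's rows dict.
def pvBld (words : List (Int × Int)) (c : Int) (base : List Int)
    (G : PySem.Dict Int (List Int)) : PySem.Dict Int (List Int) :=
  PySem.Dict.mk (G.items.map (fun p => (p.1, pvRow words c base p.2)))

theorem pvStepA_eq (words : List (Int × Int)) (c : Int) (base : List Int)
    (rows : PySem.Dict Int (List Int)) (a : Int) :
    pvStepA words c base rows a =
      (if rows.contains (a - PySem.Int.mod a c) then rows
        else rows.insert (a - PySem.Int.mod a c) base).insert (a - PySem.Int.mod a c)
        (PySem.List.pySetD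
          ((if rows.contains (a - PySem.Int.mod a c) then rows
            else rows.insert (a - PySem.Int.mod a c) base).getD (a - PySem.Int.mod a c) [])
          (PySem.Int.mod a c) ((PySem.Dict.mk words).getD a 0)) := by
  show (if rows.contains (a - PySem.Int.mod a c) then rows
        else rows.insert (a - PySem.Int.mod a c) base).insert (a - PySem.Int.mod a c)
        (PySem.List.pySetD _ (a - (a - PySem.Int.mod a c)) _) = _
  rw [show a - (a - PySem.Int.mod a c) = PySem.Int.mod a c from by ring]

theorem pvBld_contains (words : List (Int × Int)) (c : Int) (base : List Int)
    (G : PySem.Dict Int (List Int)) (k : Int) :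
    (pvBld words c base G).contains k = G.contains k := by
  simp [pvBld, PySem.Dict.contains, List.any_map, Function.comp_def]

theorem pvBld_get? (words : List (Int × Int)) (c : Int) (base : List Int)
    (G : PySem.Dict Int (List Int)) (k : Int) :
    (pvBld words c base G).get? k = (G.get? k).map (pvRow words c base) := by
  simp only [pvBld, PySem.Dict.get?, List.find?_map]
  rcases h : List.find? (fun p => p.1 == k) G.items with _ | p
  · rw [show ((fun (p : Int × List Int) => p.1 == k) ∘ fun p => (p.1, pvRow words c base p.2))
        = fun (p : Int × List Int) => p.1 == k from rfl]
    rw [show List.find? (fun (p : Int × List Int) => p.1 == k) (PySem.Dict.items G) = none from h]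
    rfl
  · rw [show ((fun (p : Int × List Int) => p.1 == k) ∘ fun p => (p.1, pvRow words c base p.2))
        = fun (p : Int × List Int) => p.1 == k from rfl]
    rw [show List.find? (fun (p : Int × List Int) => p.1 == k) (PySem.Dict.items G) = some p from h]
    rfl

theorem pvStep_comm (words : List (Int × Int)) (c : Int) (base : List Int)
    (G : PySem.Dict Int (List Int)) (a : Int) :
    pvStepA words c base (pvBld words c base G) a = pvBld words c base (pvStepB c G a) := by
  rw [pvStepA_eq]
  unfold pvStepB PySem.Dict.modify
  simp only [PySem.Dict.getD]
  generalize a - PySem.Int.mod a c = k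
  by_cases h : G.contains k = true
  · -- the row already exists: both sides overwrite it in place
    have hb : (pvBld words c base G).contains k = true := by rw [pvBld_contains]; exact h
    rcases hg : G.get? k with _ | as
    · exact absurd ((PySem.Dict.get?_eq_none_iff_contains G k).mp hg) (by simp [h])
    · simp only [hb, if_true, pvBld_get?, hg, Option.map_some, Option.getD_some]
      apply PySem.Dict.ext
      rw [PySem.Dict.items_insert_of_contains _ _ hb]
      simp only [pvBld]
      rw [PySem.Dict.items_insert_of_contains _ _ h]
      simp only [List.map_map]
      refine List.map_congr_left (fun p _ => ?_)
      by_cases hp : (p.1 == k) = true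
      · have hpk : p.1 = k := by simpa using hp
        subst hpk
        simp [pvRow, pvAsg, List.foldl_append, PySem.Dict.getD]
      · have hpk : ¬ p.1 = k := by simpa using hp
        simp [hpk]
  · -- fresh start address: both sides append a new row at the end
    have h' : G.contains k = false := by simpa using h
    have hb : (pvBld words c base G).contains k = false := by rw [pvBld_contains]; exact h'
    have hnone : G.get? k = none := (PySem.Dict.get?_eq_none_iff_contains G k).mpr h'
    simp only [hb, if_false, Bool.false_eq_true, hnone, Option.getD_none, List.nil_append,
      PySem.Dict.get?_insert_self, Option.getD_some]
    apply PySem.Dict.ext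
    rw [PySem.Dict.items_insert_of_contains _ _ (PySem.Dict.contains_insert_self _ _ _),
        PySem.Dict.items_insert_of_not_contains _ _ hb]
    simp only [pvBld]
    rw [PySem.Dict.items_insert_of_not_contains _ _ h']
    simp only [List.map_append, List.map_map]
    congr 1
    · -- prefix items have first component ≠ k, so the overwrite map leaves them unchanged
      have hb2 : ∀ q ∈ (pvBld words c base G).items, (q.1 == k) = false := by
        have := hb
        simp only [PySem.Dict.contains, List.any_eq_false] at this
        intro q hq; simpa using this q hq
      have step : ∀ q ∈ G.items,
          ((fun p => if (p.1 == k) = true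
              then (k, PySem.List.pySetD base (PySem.Int.mod a c) (((PySem.Dict.mk words).get? a).getD 0)) else p)
            ∘ (fun p => (p.1, pvRow words c base p.2))) q
          = (fun p => (p.1, pvRow words c base p.2)) q := by
        intro q hq
        have : ((q.1, pvRow words c base q.2).1 == k) = false := by
          refine hb2 (q.1, pvRow words c base q.2) ?_
          simp only [pvBld]
          exact List.mem_map.mpr ⟨q, hq, rfl⟩
        simp only [Function.comp_def, this, Bool.false_eq_true, if_false]
      exact List.map_congr_left step
    · simp [pvRow, pvAsg, PySem.Dict.getD]

theorem pvLoop (words : List (Int × Int)) (c : Int) (base : List Int)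
    (S : List Int) (G : PySem.Dict Int (List Int)) :
    S.foldl (pvStepA words c base) (pvBld words c base G)
      = pvBld words c base (S.foldl (pvStepB c) G) := by
  induction S generalizing G with
  | nil => rfl
  | cons a S ih =>
    simp only [List.foldl_cons, pvStep_comm, ih]

theorem pvBase_eq (c : Int) (p : Int) :
    (PySem.List.pyRange 0 c 1).map (fun _ => p) = List.replicate c.toNat p := by
  rw [List.map_const']
  simp [PySem.List.length_pyRange_one]

-- the second pass of B installs the built rows under distinct fresh keys, hence appends them in order
theorem pvAlt_items (words : List (Int × Int)) (c : Int) (base : List Int)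
    (G : PySem.Dict Int (List Int)) (hG : G.keys.Nodup) :
    (G.items.foldl (fun rows p => rows.insert p.1 (pvRow words c base p.2))
      (PySem.Dict.empty : PySem.Dict Int (List Int))).items
      = G.items.map (fun p => (p.1, pvRow words c base p.2)) := by
  rw [PySem.Dict.items_foldl_insert_fresh G.items Prod.fst
      (fun p => pvRow words c base p.2) PySem.Dict.empty
      (by intro a _; simp [PySem.Dict.contains_empty])
      (by simpa [PySem.Dict.keys] using hG)]
  rfl

theorem pvTotal_eq (words : List (Int × Int)) (c : Int) (padding : Option Int) :
    chunkWords words c padding = chunkWords_alt words c padding := by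
  have main : ∀ base : List Int,
      (((PySem.List.sorted (PySem.Set.ofList (words.map Prod.fst)) (fun a => a) false).foldl
        (pvStepA words c base) PySem.Dict.empty).items)
      = ((((PySem.List.sorted (PySem.Set.ofList (words.map Prod.fst)) (fun a => a) false).foldl
        (pvStepB c) PySem.Dict.empty).items).foldl
          (fun rows p => rows.insert p.1 (pvRow words c base p.2))
          (PySem.Dict.empty : PySem.Dict Int (List Int))).items := by
    intro base
    set S := PySem.List.sorted (PySem.Set.ofList (words.map Prod.fst)) (fun a => a) false with hS
    have hnodup : (S.foldl (pvStepB c) PySem.Dict.empty).keys.Nodup := by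
      have := PySem.Dict.nodup_keys_foldl_modify_key S
        (fun a => a - PySem.Int.mod a c) ([] : List Int)
        (fun _ a => (· ++ [a])) PySem.Dict.empty
        (by simp [PySem.Dict.keys_empty])
      simpa [pvStepB] using this
    rw [pvAlt_items words c base _ hnodup]
    have h0 : (PySem.Dict.empty : PySem.Dict Int (List Int))
        = pvBld words c base PySem.Dict.empty := rfl
    conv_lhs => rw [h0, pvLoop]
    rfl
  cases padding with
  | none =>
      show (((PySem.List.sorted (PySem.Set.ofList (words.map Prod.fst)) (fun a => a) false).foldl
        (pvStepA words c []) PySem.Dict.empty).items) = _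
      rw [main []]
      rfl
  | some p =>
      show (((PySem.List.sorted (PySem.Set.ofList (words.map Prod.fst)) (fun a => a) false).foldl
        (pvStepA words c ((PySem.List.pyRange 0 c 1).map (fun _ => p))) PySem.Dict.empty).items) = _
      rw [main _]
      show _ = (((PySem.List.sorted (PySem.Set.ofList (words.map Prod.fst)) (fun a => a) false).foldl
        (pvStepB c) PySem.Dict.empty).items.foldl
          (fun rows q => rows.insert q.1 (pvRow words c (List.replicate c.toNat p) q.2))
          (PySem.Dict.empty : PySem.Dict Int (List Int))).items
      rw [pvBase_eq]

-- ===== VERDICT (by name: the statement is the Claim_ definition above) =====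
theorem chunkWords_spec : Claim_equal_chunkWords := by
  intro words chunksize padding _ _
  show chunkWords words chunksize padding = chunkWords_alt words chunksize padding
  exact pvTotal_eq words chunksize padding
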